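-- pv_equiv track=rewrite | github.com/EvgeniiGu/PythonOBT | PythonOBT.py | check_for_coincidence_of_digits
-- ===== SOURCE A (Python) =====
-- def check_for_coincidence_of_digits(m1, m2, i, j):
--     if m2[j].count('~') > 1:
--         for k1 in range(4):
--             if m2[j][k1] == '~':
--                 continue
--             else:
--                 for k2 in range(4):
--                     if m2[j][k2] == '~':
--                         continue
--                     else:
--                         two = m1[i][k1] == m2[j][k1] and m1[i][k2] == m2[j][k2]
--                         if two == True and k1 != k2:
--                                 return True
--     else:
--         for k1 in range(4):
--             if m2[j][k1] == '~':
--                 continue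
--             else:
--                 for k2 in range(4):
--                     if m2[j][k2] == '~':
--                         continue
--                     else:
--                         for k3 in range(4):
--                             if m2[j][k3] == '~':
--                                 continue
--                             else:
--                                 three = m1[i][k1] == m2[j][k1] and m1[i][k2] == m2[j][k2] and m1[i][k3] == m2[j][k3]
--                                 if three == True and k1 != k2 and k1 != k3 and k2 != k3:
--                                     return True
--     return False
-- ===== SOURCE B (Python) =====
-- def check_for_coincidence_of_digits(m1, m2, i, j):
--     matches = sum(1 for k in range(4) if m2[j][k] != '~' and m1[i][k] == m2[j][k])
--     threshold = 2 if m2[j].count('~') > 1 else 3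
--     return matches >= threshold
-- ===== Notes on version B (the rewrite author's own statement) =====
-- stated objective: simpler
-- what changed: Replaces A's branch-wise nested enumeration of ordered pairs/triples of distinct non-'~' positions (up to 4^3 iterations with early return) by one linear pass counting matching non-'~' positions among the four, compared against a threshold of 2 or 3 chosen by the tilde count.
-- outside the precondition, e.g. on check_for_coincidence_of_digits([['2', '2']], [['2', '2', '1', '1', '~', '~']], 0, 0): A returns True, B raises IndexError; on check_for_coincidence_of_digits([['2', '1']], [['2', '1', '1', '~', '~']], 0, 0): A returns True, B raises IndexError
import Mathlib
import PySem

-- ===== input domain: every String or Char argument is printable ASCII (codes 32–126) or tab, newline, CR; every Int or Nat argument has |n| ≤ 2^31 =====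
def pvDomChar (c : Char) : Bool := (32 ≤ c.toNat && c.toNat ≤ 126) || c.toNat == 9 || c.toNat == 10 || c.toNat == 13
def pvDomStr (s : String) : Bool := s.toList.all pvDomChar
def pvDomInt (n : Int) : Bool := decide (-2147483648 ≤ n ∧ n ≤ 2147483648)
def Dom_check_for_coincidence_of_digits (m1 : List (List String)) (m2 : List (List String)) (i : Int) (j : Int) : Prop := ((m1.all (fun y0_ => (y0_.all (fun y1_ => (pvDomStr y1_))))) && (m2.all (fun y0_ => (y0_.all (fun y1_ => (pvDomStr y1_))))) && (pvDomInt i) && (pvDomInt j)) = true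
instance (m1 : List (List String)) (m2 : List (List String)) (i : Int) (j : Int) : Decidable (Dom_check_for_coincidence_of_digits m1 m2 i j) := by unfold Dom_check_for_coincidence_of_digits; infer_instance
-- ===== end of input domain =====

-- B replaces A's nested two/three-index enumerations by a single linear count of matching
-- non-tilde positions compared against a threshold (simpler, one pass).

-- ===== PORT A =====
-- literal transliteration of A: branch on count('~') > 1, nested range(4) searches with
-- early return (ported as List.any); element accesses via pyGetD (total; Pre_ keeps inputs
-- where the Python does not raise).
def check_for_coincidence_of_digits (m1 : List (List String)) (m2 : List (List String)) (i : Int) (j : Int) : Bool :=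
  if PySem.List.count (PySem.List.pyGetD m2 j []) "~" > 1 then
    (PySem.List.pyRange 0 4 1).any (fun k1 =>
      if PySem.List.pyGetD (PySem.List.pyGetD m2 j []) k1 "" == "~" then false
      else (PySem.List.pyRange 0 4 1).any (fun k2 =>
        if PySem.List.pyGetD (PySem.List.pyGetD m2 j []) k2 "" == "~" then false
        else
          let two := (PySem.List.pyGetD (PySem.List.pyGetD m1 i []) k1 "" == PySem.List.pyGetD (PySem.List.pyGetD m2 j []) k1 "")
                  && (PySem.List.pyGetD (PySem.List.pyGetD m1 i []) k2 "" == PySem.List.pyGetD (PySem.List.pyGetD m2 j []) k2 "")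
          two && (k1 != k2)))
  else
    (PySem.List.pyRange 0 4 1).any (fun k1 =>
      if PySem.List.pyGetD (PySem.List.pyGetD m2 j []) k1 "" == "~" then false
      else (PySem.List.pyRange 0 4 1).any (fun k2 =>
        if PySem.List.pyGetD (PySem.List.pyGetD m2 j []) k2 "" == "~" then false
        else (PySem.List.pyRange 0 4 1).any (fun k3 =>
          if PySem.List.pyGetD (PySem.List.pyGetD m2 j []) k3 "" == "~" then false
          else
            let three := (PySem.List.pyGetD (PySem.List.pyGetD m1 i []) k1 "" == PySem.List.pyGetD (PySem.List.pyGetD m2 j []) k1 "")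
                      && (PySem.List.pyGetD (PySem.List.pyGetD m1 i []) k2 "" == PySem.List.pyGetD (PySem.List.pyGetD m2 j []) k2 "")
                      && (PySem.List.pyGetD (PySem.List.pyGetD m1 i []) k3 "" == PySem.List.pyGetD (PySem.List.pyGetD m2 j []) k3 "")
            three && (k1 != k2) && (k1 != k3) && (k2 != k3))))

-- ===== PORT B =====
-- one pass over the four positions: count matching non-'~' positions, compare to threshold
-- (the '~' test guards the m1[i][k] read, exactly as Source B's short-circuiting 'and')
def check_for_coincidence_of_digits_alt (m1 : List (List String)) (m2 : List (List String)) (i : Int) (j : Int) : Bool :=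
  let nMatches := (PySem.List.pyRange 0 4 1).countP
      (fun k => !(PySem.List.pyGetD (PySem.List.pyGetD m2 j []) k "" == "~")
             && (PySem.List.pyGetD (PySem.List.pyGetD m1 i []) k "" == PySem.List.pyGetD (PySem.List.pyGetD m2 j []) k ""))
  let threshold := if PySem.List.count (PySem.List.pyGetD m2 j []) "~" > 1 then 2 else 3
  decide (nMatches ≥ threshold)

-- ===== PRECONDITION & SPEC =====
-- Pre_ excludes exactly the inputs on which a program raises IndexError: A raises when m2[j]
-- is missing or shorter than 4, or when it reads m1[i][k] at a non-'~' position k it reaches;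
-- additionally excluded is the degenerate case where some non-'~' position among the first
-- four lies beyond len(m1[i]) yet A finds an early matching pair and returns True before
-- reaching it — there B's single full count raises IndexError (as A itself does in all other
-- such cases), so those inputs lie outside Pre_ (see claim.json cites).
def Pre_check_for_coincidence_of_digits (m1 : List (List String)) (m2 : List (List String)) (i : Int) (j : Int) : Prop :=
  PySem.Raise.InRange m2.length j ∧
  4 ≤ (PySem.List.pyGetD m2 j []).length ∧
  ((∃ k : Nat, k < 4 ∧ (PySem.List.pyGetD m2 j []).getD k "" ≠ "~") →
    PySem.Raise.InRange m1.length i ∧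
    ∀ k : Nat, k < 4 → (PySem.List.pyGetD m2 j []).getD k "" ≠ "~" → k < (PySem.List.pyGetD m1 i []).length)
instance (m1 : List (List String)) (m2 : List (List String)) (i : Int) (j : Int) : Decidable (Pre_check_for_coincidence_of_digits m1 m2 i j) := by unfold Pre_check_for_coincidence_of_digits; infer_instance

def pvWitness_check_for_coincidence_of_digits : List (List String) × List (List String) × Int × Int :=
  ([["1", "2", "3", "4"]], [["1", "2", "~", "~"]], 0, 0)

def Spec_check_for_coincidence_of_digits (m1 : List (List String)) (m2 : List (List String)) (i : Int) (j : Int) (out : Bool) : Prop := out = check_for_coincidence_of_digits_alt m1 m2 i j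
instance (m1 : List (List String)) (m2 : List (List String)) (i : Int) (j : Int) (out : Bool) : Decidable (Spec_check_for_coincidence_of_digits m1 m2 i j out) := by unfold Spec_check_for_coincidence_of_digits; infer_instance

-- ===== CLAIM (what is proved, stated in full; the proofs are below) =====
def Claim_equal_check_for_coincidence_of_digits : Prop := ∀ (m1 : List (List String)) (m2 : List (List String)) (i : Int) (j : Int), Dom_check_for_coincidence_of_digits m1 m2 i j → Pre_check_for_coincidence_of_digits m1 m2 i j → Spec_check_for_coincidence_of_digits m1 m2 i j (check_for_coincidence_of_digits m1 m2 i j)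

-- ===== LEMMAS AND PROOFS =====

-- The boolean identity behind the equivalence: over the four positions, "some pair (resp.
-- triple) of distinct non-'~' positions all match" is the same as "the count of matching
-- non-'~' positions reaches 2 (resp. 3)".  It holds for arbitrary rows, so the ports agree
-- unconditionally; Pre_ is only needed for faithfulness to the raising Python.
theorem ports_agree (m1 m2 : List (List String)) (i j : Int) :
    check_for_coincidence_of_digits m1 m2 i j = check_for_coincidence_of_digits_alt m1 m2 i j := by
  unfold check_for_coincidence_of_digits check_for_coincidence_of_digits_alt
  have hr : PySem.List.pyRange 0 4 1 = [0, 1, 2, 3] := by decide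
  rw [hr]
  simp only [List.any_cons, List.any_nil, List.countP_cons, List.countP_nil]
  by_cases hc : PySem.List.count (PySem.List.pyGetD m2 j []) "~" > 1 <;>
    [rw [if_pos hc, if_pos hc]; rw [if_neg hc, if_neg hc]] <;>
  · generalize (PySem.List.pyGetD (PySem.List.pyGetD m1 i []) (0 : Int) "" == PySem.List.pyGetD (PySem.List.pyGetD m2 j []) (0 : Int) "") = q0
    generalize (PySem.List.pyGetD (PySem.List.pyGetD m1 i []) (1 : Int) "" == PySem.List.pyGetD (PySem.List.pyGetD m2 j []) (1 : Int) "") = q1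
    generalize (PySem.List.pyGetD (PySem.List.pyGetD m1 i []) (2 : Int) "" == PySem.List.pyGetD (PySem.List.pyGetD m2 j []) (2 : Int) "") = q2
    generalize (PySem.List.pyGetD (PySem.List.pyGetD m1 i []) (3 : Int) "" == PySem.List.pyGetD (PySem.List.pyGetD m2 j []) (3 : Int) "") = q3
    generalize (PySem.List.pyGetD (PySem.List.pyGetD m2 j []) (0 : Int) "" == "~") = e0
    generalize (PySem.List.pyGetD (PySem.List.pyGetD m2 j []) (1 : Int) "" == "~") = e1
    generalize (PySem.List.pyGetD (PySem.List.pyGetD m2 j []) (2 : Int) "" == "~") = e2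
    generalize (PySem.List.pyGetD (PySem.List.pyGetD m2 j []) (3 : Int) "" == "~") = e3
    revert q0 q1 q2 q3 e0 e1 e2 e3
    decide

-- ===== VERDICT (by name: the statement is the Claim_ definition above) =====
theorem check_for_coincidence_of_digits_spec : Claim_equal_check_for_coincidence_of_digits := by
  intro m1 m2 i j _ _
  exact ports_agree m1 m2 i j
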